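-- pv_equiv track=rewrite | github.com/GeoGateway/BuriedSAFSlip2010 | edgar3.3.py | nextContiguousSet
-- ===== SOURCE A (Python) =====
-- def nextContiguousSet(indexList):
--    """
--    nextContiguousSet finds contiguous entries in indexList starting
--    with index "start."  Might be more convenient to have calling function
--    modify the list each call, removing the contiguous set as it is processed
--    so that next call finds the next one without "start" item passed.
--
--    Calling example: from column indices of dead pixels, print contiguous sets
--
--    #t=rowOfPixList(2, deadPxList)
--    #t.sort()
--    #st = 0
--    #while 1:
--    #   a,t =nextContiguousSet( t)
--    #   if a == []: break
--    #   st = max(a) + 1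
--    #   print a
--    #
--    """
--    start = 0
--    contigList = []
--    firstInList = None
--    remaining = [] # if contigList gets to end of row/col, none remain
--    for idex,item in enumerate(indexList):
--       if firstInList is None:
--          firstInList = item
--          contigList.append(item)
--
--       else:
--          if item == contigList[-1] + 1:
--             contigList.append(item)
--          else:
--             remaining = indexList[idex:]
--             break
--    return contigList,remaining
-- ===== SOURCE B (Python) =====
-- def nextContiguousSet(indexList):
--     # Find the boundary of the contiguous head first, then slice once.
--     split = len(indexList)
--     for i in range(1, len(indexList)):
--         if indexList[i] != indexList[i - 1] + 1:
--             split = i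
--             break
--     return indexList[:split], indexList[split:]
-- ===== Notes on version B (the rewrite author's own statement) =====
-- stated objective: simpler
-- what changed: B computes the split index with a scan over adjacent pairs and materialises both parts with two slices, instead of accumulating the head element-by-element while tracking a first-element sentinel and a last-value lookup.
import Mathlib
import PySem

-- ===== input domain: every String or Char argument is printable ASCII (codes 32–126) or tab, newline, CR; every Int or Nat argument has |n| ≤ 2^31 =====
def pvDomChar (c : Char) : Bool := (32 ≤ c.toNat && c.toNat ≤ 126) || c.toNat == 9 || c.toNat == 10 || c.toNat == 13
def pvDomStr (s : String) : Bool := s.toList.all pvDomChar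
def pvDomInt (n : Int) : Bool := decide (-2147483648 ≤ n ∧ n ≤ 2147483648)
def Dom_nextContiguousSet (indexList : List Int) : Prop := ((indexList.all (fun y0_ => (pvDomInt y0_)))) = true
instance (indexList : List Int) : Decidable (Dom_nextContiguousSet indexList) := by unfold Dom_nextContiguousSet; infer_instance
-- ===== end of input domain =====

-- B finds the split index first and slices, instead of A's element-by-element accumulation: simpler decomposition, same cost.

-- ===== PORT A =====
-- A's 'for idex,item in enumerate(indexList)' loop; state: contigList, firstInList;
-- 'break' returns (contigList, indexList[idex:]).
def nextContiguousSetLoop (full : List Int) : List Int → Nat → List Int → Option Int → List Int × List Int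
  | [], _, contig, _ => (contig, [])
  | item :: tl, idex, contig, firstInList =>
    match firstInList with
    | none => nextContiguousSetLoop full tl (idex + 1) (contig ++ [item]) (some item)
    | some f =>
      -- contigList[-1]: contig is nonempty whenever this branch runs, so the default is never read
      if item = PySem.List.pyGetD contig (-1) 0 + 1 then
        nextContiguousSetLoop full tl (idex + 1) (contig ++ [item]) (some f)
      else
        (contig, PySem.List.slice full (some (idex : Int)) none)

def nextContiguousSet (indexList : List Int) : List Int × List Int :=
  nextContiguousSetLoop indexList indexList 0 [] none

-- ===== PORT B =====
-- 'for i in range(1, len(indexList)): if indexList[i] != indexList[i-1] + 1: split = i; break'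
-- fuel (starts at len, one unit per iteration) only makes the recursion structural; the computation is the Python loop
def findSplitGo (l : List Int) : Nat → Nat → Nat
  | 0, _ => l.length
  | fuel + 1, i =>
    if h : i < l.length then
      if l[i]'h ≠ l[i - 1]'(by omega) + 1 then i else findSplitGo l fuel (i + 1)
    else l.length

def nextContiguousSet_alt (indexList : List Int) : List Int × List Int :=
  let split := findSplitGo indexList indexList.length 1
  (PySem.List.slice indexList none (some (split : Int)),
   PySem.List.slice indexList (some (split : Int)) none)

-- ===== PRECONDITION & SPEC =====
def Spec_nextContiguousSet (indexList : List Int) (out : List Int × List Int) : Prop := out = nextContiguousSet_alt indexList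
instance (indexList : List Int) (out : List Int × List Int) : Decidable (Spec_nextContiguousSet indexList out) := by unfold Spec_nextContiguousSet; infer_instance

-- ===== CLAIM (what is proved, stated in full; the proofs are below) =====
def Claim_equal_nextContiguousSet : Prop := ∀ (indexList : List Int), Dom_nextContiguousSet indexList → Spec_nextContiguousSet indexList (nextContiguousSet indexList)

-- ===== LEMMAS AND PROOFS =====
-- length of the run of successive increments-by-one continuing value c
def pvRun : Int → List Int → Nat
  | _, [] => 0
  | c, x :: t => if x = c + 1 then pvRun x t + 1 else 0

theorem loopA_eq (rest : List Int) : ∀ (full contig : List Int) (idex : Nat) (c f : Int),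
    (hne : contig ≠ []) → contig.getLast hne = c → full.drop idex = rest →
    nextContiguousSetLoop full rest idex contig (some f)
      = (contig ++ rest.take (pvRun c rest), rest.drop (pvRun c rest)) := by
  induction rest with
  | nil => intro full contig idex c f hne _ _; simp [nextContiguousSetLoop, pvRun]
  | cons item tl ih =>
    intro full contig idex c f hne hlast hdrop
    have hget : PySem.List.pyGetD contig (-1) 0 = c := by
      rw [PySem.List.pyGetD_neg_one (h := hne)]; exact hlast
    by_cases hx : item = c + 1
    · have hdrop' : full.drop (idex + 1) = tl := by
        rw [← List.tail_drop, hdrop]; rfl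
      have hne' : contig ++ [item] ≠ [] := by simp
      have hlast' : (contig ++ [item]).getLast hne' = item := by simp
      simp only [nextContiguousSetLoop, hget]
      rw [if_pos hx, ih full (contig ++ [item]) (idex + 1) item f hne' hlast' hdrop']
      simp [pvRun, hx]
    · simp only [nextContiguousSetLoop, hget, if_neg hx]
      rw [PySem.List.slice_from_natCast, hdrop]
      simp [pvRun, hx]

theorem findSplit_eq (rest : List Int) : ∀ (pre : List Int) (c : Int) (fuel : Nat),
    rest.length ≤ fuel →
    findSplitGo (pre ++ c :: rest) fuel (pre.length + 1) = pre.length + 1 + pvRun c rest := by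
  induction rest with
  | nil =>
    intro pre c fuel _
    cases fuel <;> simp [findSplitGo, pvRun]
  | cons x t ih =>
    intro pre c fuel hfuel
    obtain ⟨f, rfl⟩ : ∃ f, fuel = f + 1 := ⟨fuel - 1, by simp at hfuel; omega⟩
    rw [findSplitGo]
    have hlen : pre.length + 1 < (pre ++ c :: x :: t).length := by simp
    have h1 : (pre ++ c :: x :: t)[pre.length + 1]'hlen = x := by
      rw [List.getElem_append_right (by omega)]; simp
    rw [dif_pos hlen]
    by_cases hx : x = c + 1
    · rw [if_neg (by simp [hx])]
      calc findSplitGo (pre ++ c :: x :: t) f (pre.length + 1 + 1)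
          = findSplitGo ((pre ++ [c]) ++ x :: t) f (pre.length + 1 + 1) := by simp
        _ = pre.length + 1 + 1 + pvRun x t := by
              have h := ih (pre ++ [c]) x f (by simp at hfuel ⊢; omega)
              simpa [List.append_assoc, Nat.add_assoc] using h
        _ = pre.length + 1 + pvRun c (x :: t) := by simp [pvRun, hx]; omega
    · rw [if_pos (by simp [h1]; exact fun h => absurd h hx)]
      simp [pvRun, hx]

-- ===== VERDICT (by name: the statement is the Claim_ definition above) =====
theorem nextContiguousSet_spec : Claim_equal_nextContiguousSet := by
  intro indexList _
  unfold Spec_nextContiguousSet nextContiguousSet nextContiguousSet_alt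
  cases indexList with
  | nil => simp [nextContiguousSetLoop, findSplitGo, PySem.List.slice]
  | cons x tl =>
    have hsplit : findSplitGo (x :: tl) (x :: tl).length 1 = 1 + pvRun x tl := by
      have := findSplit_eq tl [] x (x :: tl).length (by simp)
      simpa using this
    have hloop := loopA_eq tl (x :: tl) [x] 1 x x (by simp) (by simp) (by simp)
    simp only [nextContiguousSetLoop, hsplit]
    rw [PySem.List.slice_to_natCast, PySem.List.slice_from_natCast]
    simp only [Nat.add_comm 1 (pvRun x tl), List.take_succ_cons, List.drop_succ_cons]
    simpa using hloop
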